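-- pv_equiv track=rewrite | github.com/lauraksluk/Mahjong-AI | player.py | orderHand
-- ===== SOURCE A (Python) =====
-- def orderHand(L):
--     L1,L2,L3,L4 = [],[],[],[]
--     for tile in L:
--         if 'wan' in tile:
--             L1.append(tile)
--             L1.sort()
--         elif 'bam' in tile:
--             L2.append(tile)
--             L2.sort()
--         elif 'tong' in tile:
--             L3.append(tile)
--             L3.sort()
--         else:
--             L4.append(tile)
--             L4.sort()
--     result = L1+L2+L3+L4
--     return result
-- ===== SOURCE B (Python) =====
-- def _suit(tile):
--     if 'wan' in tile:
--         return 0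
--     if 'bam' in tile:
--         return 1
--     if 'tong' in tile:
--         return 2
--     return 3
--
--
-- def orderHand(L):
--     return sorted(L, key=lambda tile: (_suit(tile), tile))
-- ===== Notes on version B (the rewrite author's own statement) =====
-- stated objective: faster
-- what changed: B performs a single sort of the whole hand under a composite (suit-rank, tile) key instead of A's bucketing with a re-sort of the growing bucket after every append; B keeps no buckets at all.
import Mathlib
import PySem

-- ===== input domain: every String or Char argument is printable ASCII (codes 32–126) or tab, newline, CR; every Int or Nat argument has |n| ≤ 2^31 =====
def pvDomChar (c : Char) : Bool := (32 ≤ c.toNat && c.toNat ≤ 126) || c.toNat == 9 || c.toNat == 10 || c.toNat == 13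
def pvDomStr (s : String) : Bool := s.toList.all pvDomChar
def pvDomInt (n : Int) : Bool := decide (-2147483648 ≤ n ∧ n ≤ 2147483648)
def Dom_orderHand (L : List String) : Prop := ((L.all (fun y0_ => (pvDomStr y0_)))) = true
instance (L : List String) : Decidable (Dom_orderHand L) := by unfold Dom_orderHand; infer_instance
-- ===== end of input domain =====

-- B replaces A's bucket-and-resort loop by one sort of the whole list under a composite (suit, tile) key (faster).


-- ===== PORT A =====
-- one loop iteration of A: append the tile to its bucket, then sort that bucket
def orderHandStepA (st : List String × List String × List String × List String)
    (tile : String) : List String × List String × List String × List String :=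
  let (l1, l2, l3, l4) := st
  if PySem.Str.isIn "wan" tile then
    (PySem.List.sorted (l1 ++ [tile]) (fun x => x) false, l2, l3, l4)
  else if PySem.Str.isIn "bam" tile then
    (l1, PySem.List.sorted (l2 ++ [tile]) (fun x => x) false, l3, l4)
  else if PySem.Str.isIn "tong" tile then
    (l1, l2, PySem.List.sorted (l3 ++ [tile]) (fun x => x) false, l4)
  else
    (l1, l2, l3, PySem.List.sorted (l4 ++ [tile]) (fun x => x) false)

def orderHand (L : List String) : List String :=
  let st := L.foldl orderHandStepA ([], [], [], [])
  st.1 ++ st.2.1 ++ st.2.2.1 ++ st.2.2.2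

-- ===== PORT B =====
-- B's helper _suit
def orderHandSuit (tile : String) : Int :=
  if PySem.Str.isIn "wan" tile then 0
  else if PySem.Str.isIn "bam" tile then 1
  else if PySem.Str.isIn "tong" tile then 2
  else 3

-- sorted(L, key=lambda tile: (_suit(tile), tile))  — tuple key, PySem.List.sorted2
def orderHand_alt (L : List String) : List String :=
  PySem.List.sorted2 L orderHandSuit (fun tile => tile) false

-- ===== PRECONDITION & SPEC =====
def Spec_orderHand (L : List String) (out : List String) : Prop := out = orderHand_alt L
instance (L : List String) (out : List String) : Decidable (Spec_orderHand L out) := by unfold Spec_orderHand; infer_instance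

-- ===== CLAIM (what is proved, stated in full; the proofs are below) =====
def Claim_equal_orderHand : Prop := ∀ (L : List String), Dom_orderHand L → Spec_orderHand L (orderHand L)

-- ===== LEMMAS AND PROOFS =====

-- sorted2 with keys k1, k2 is sorted under the lexicographic product key
theorem sorted2_eq_sorted_lex {α κ₁ κ₂ : Type} [LinearOrder κ₁] [LinearOrder κ₂]
    (xs : List α) (k1 : α → κ₁) (k2 : α → κ₂) :
    PySem.List.sorted2 xs k1 k2 false
      = PySem.List.sorted xs (fun x => toLex (k1 x, k2 x)) false := by
  rw [PySem.List.sorted_eq_foldl_insertBy]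
  show xs.foldl (fun acc x => PySem.List.insertBy
      (fun a b => decide (k1 a < k1 b) || (!decide (k1 b < k1 a) && decide (k2 a < k2 b))) x acc) []
    = _
  have hcmp : (fun (a b : α) => decide (k1 a < k1 b) || (!decide (k1 b < k1 a) && decide (k2 a < k2 b)))
      = fun a b => decide (toLex (k1 a, k2 a) < toLex (k1 b, k2 b)) := by
    funext a b
    rcases lt_trichotomy (k1 a) (k1 b) with h | h | h
    · simp [Prod.Lex.lt_iff, h]
    · simp [Prod.Lex.lt_iff, h]
    · simp [Prod.Lex.lt_iff, h, lt_asymm h, h.ne']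
  rw [hcmp]

-- the composite key B sorts by
def lexKey (t : String) : Lex (Int × String) := toLex (orderHandSuit t, t)

-- the four disjoint bucket tests, in A's branch order
def qWan (t : String) : Bool := PySem.Str.isIn "wan" t
def qBam (t : String) : Bool := !PySem.Str.isIn "wan" t && PySem.Str.isIn "bam" t
def qTong (t : String) : Bool := !PySem.Str.isIn "wan" t && !PySem.Str.isIn "bam" t && PySem.Str.isIn "tong" t
def qOther (t : String) : Bool := !PySem.Str.isIn "wan" t && !PySem.Str.isIn "bam" t && !PySem.Str.isIn "tong" t

-- plain bucketing step (no sorting), used only to reason about A's fold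
def bucketStep (st : List String × List String × List String × List String)
    (tile : String) : List String × List String × List String × List String :=
  let (l1, l2, l3, l4) := st
  if PySem.Str.isIn "wan" tile then (l1 ++ [tile], l2, l3, l4)
  else if PySem.Str.isIn "bam" tile then (l1, l2 ++ [tile], l3, l4)
  else if PySem.Str.isIn "tong" tile then (l1, l2, l3 ++ [tile], l4)
  else (l1, l2, l3, l4 ++ [tile])

-- sorting after the append absorbs a previous sort (sorted of a permutation, identity key)
theorem sorted_sorted_append (l : List String) (t : String) :
    PySem.List.sorted (PySem.List.sorted l (fun x => x) false ++ [t]) (fun x => x) false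
      = PySem.List.sorted (l ++ [t]) (fun x => x) false := by
  apply PySem.List.sorted_eq_sorted_of_perm _ _ _ (fun a b h => h)
  exact (PySem.List.sorted_perm l (fun x => x) false).append_right [t]

-- A's fold state is pointwise the sorted image of the plain bucketing fold state
theorem fold_invariant (L : List String) (a1 a2 a3 a4 : List String) :
    L.foldl orderHandStepA
      (PySem.List.sorted a1 (fun x => x) false, PySem.List.sorted a2 (fun x => x) false,
       PySem.List.sorted a3 (fun x => x) false, PySem.List.sorted a4 (fun x => x) false)
    = (let st := L.foldl bucketStep (a1, a2, a3, a4)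
       (PySem.List.sorted st.1 (fun x => x) false, PySem.List.sorted st.2.1 (fun x => x) false,
        PySem.List.sorted st.2.2.1 (fun x => x) false, PySem.List.sorted st.2.2.2 (fun x => x) false)) := by
  induction L generalizing a1 a2 a3 a4 with
  | nil => rfl
  | cons t L ih =>
      simp only [List.foldl_cons, orderHandStepA, bucketStep]
      split_ifs <;> simp only [sorted_sorted_append] <;> exact ih _ _ _ _

-- the plain bucketing fold collects the four filters
theorem bucket_fold_eq_filters (L : List String) (a1 a2 a3 a4 : List String) :
    L.foldl bucketStep (a1, a2, a3, a4)
      = (a1 ++ L.filter qWan, a2 ++ L.filter qBam, a3 ++ L.filter qTong, a4 ++ L.filter qOther) := by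
  induction L generalizing a1 a2 a3 a4 with
  | nil => simp
  | cons t L ih =>
      simp only [List.foldl_cons, bucketStep]
      by_cases hw : PySem.Str.isIn "wan" t <;>
        by_cases hb : PySem.Str.isIn "bam" t <;>
          by_cases ht : PySem.Str.isIn "tong" t <;>
            simp only [Bool.not_eq_true] at hw hb ht <;>
            simp only [hw, hb, ht, if_true, Bool.false_eq_true,
              ih, qWan, qBam, qTong, qOther, List.filter_cons, Bool.not_true, Bool.not_false,
              Bool.true_and, Bool.false_and, Bool.and_true, Bool.and_false, Bool.and_self] <;>
            simp [List.append_assoc]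

-- L is a permutation of its four disjoint bucket filters, concatenated
theorem perm_partition (L : List String) :
    L.Perm (L.filter qWan ++ L.filter qBam ++ L.filter qTong ++ L.filter qOther) := by
  induction L with
  | nil => simp
  | cons t L ih =>
      by_cases hw : PySem.Str.isIn "wan" t <;>
        by_cases hb : PySem.Str.isIn "bam" t <;>
          by_cases ht : PySem.Str.isIn "tong" t <;>
            simp only [List.filter_cons, qWan, qBam, qTong, qOther, hw, hb, ht,
              Bool.not_true, Bool.not_false, Bool.and_self, Bool.true_and, Bool.false_and,
              Bool.and_true, Bool.and_false, if_true, if_false, cond_true, cond_false,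
              ite_true, ite_false, List.append_assoc] <;>
            first
              | exact ih.cons t
              | exact ((ih.cons t).trans (by
                  simpa [List.append_assoc] using
                    (List.perm_middle (a := t)
                      (l₁ := L.filter qWan)
                      (l₂ := L.filter qBam ++ L.filter qTong ++ L.filter qOther)).symm))
              | exact ((ih.cons t).trans (by
                  simpa [List.append_assoc] using
                    (List.perm_middle (a := t)
                      (l₁ := L.filter qWan ++ L.filter qBam)
                      (l₂ := L.filter qTong ++ L.filter qOther)).symm))
              | exact ((ih.cons t).trans (by
                  simpa [List.append_assoc] using
                    (List.perm_middle (a := t)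
                      (l₁ := L.filter qWan ++ L.filter qBam ++ L.filter qTong)
                      (l₂ := L.filter qOther)).symm))

-- each bucket test pins the suit value
theorem suit_of_qWan {t : String} (h : qWan t = true) : orderHandSuit t = 0 := by
  simp only [qWan] at h; simp only [orderHandSuit, h, if_true]
theorem suit_of_qBam {t : String} (h : qBam t = true) : orderHandSuit t = 1 := by
  simp only [qBam, Bool.and_eq_true, Bool.not_eq_true'] at h
  simp only [orderHandSuit, h.1, h.2, Bool.false_eq_true, if_true, if_false]
theorem suit_of_qTong {t : String} (h : qTong t = true) : orderHandSuit t = 2 := by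
  simp only [qTong, Bool.and_eq_true, Bool.not_eq_true'] at h
  obtain ⟨⟨h1, h2⟩, h3⟩ := h
  simp only [orderHandSuit, h1, h2, h3, Bool.false_eq_true, if_true, if_false]
theorem suit_of_qOther {t : String} (h : qOther t = true) : orderHandSuit t = 3 := by
  simp only [qOther, Bool.and_eq_true, Bool.not_eq_true'] at h
  obtain ⟨⟨h1, h2⟩, h3⟩ := h
  simp only [orderHandSuit, h1, h2, h3, Bool.false_eq_true, if_false]

-- a sorted bucket of constant suit is pairwise ≤ under the composite key
theorem pairwise_key_sorted_bucket (l : List String) (i : Int)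
    (h : ∀ t ∈ l, orderHandSuit t = i) :
    (PySem.List.sorted l (fun x => x) false).Pairwise (fun a b => lexKey a ≤ lexKey b) := by
  refine (PySem.List.sorted_pairwise l (fun x => x)).imp_of_mem ?_
  intro a b ha hb hab
  rw [PySem.List.mem_sorted] at ha hb
  refine Prod.Lex.le_iff.mpr (Or.inr ⟨?_, hab⟩)
  show orderHandSuit a = orderHandSuit b
  rw [h a ha, h b hb]

-- across buckets: a strictly smaller suit gives a strictly smaller key
theorem key_le_of_suit_lt {x y : String} (h : orderHandSuit x < orderHandSuit y) :
    lexKey x ≤ lexKey y := le_of_lt (Prod.Lex.lt_iff.mpr (Or.inl h))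

-- B's one sort under the composite key, spelled via sorted2_eq_sorted_lex
theorem alt_eq_sorted_lexKey (L : List String) :
    orderHand_alt L = PySem.List.sorted L lexKey false := by
  unfold orderHand_alt
  rw [sorted2_eq_sorted_lex L orderHandSuit (fun tile => tile)]
  rfl

theorem lexKey_injective : Function.Injective lexKey := by
  intro a b h
  have := congrArg (fun p : Lex (Int × String) => (ofLex p).2) h
  simpa using this

-- ===== VERDICT (by name: the statement is the Claim_ definition above) =====
theorem orderHand_spec : Claim_equal_orderHand := by
  intro L _
  show orderHand L = orderHand_alt L
  -- A's side: four sorted filters, concatenated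
  have hA : orderHand L
      = PySem.List.sorted (L.filter qWan) (fun x => x) false
        ++ PySem.List.sorted (L.filter qBam) (fun x => x) false
        ++ PySem.List.sorted (L.filter qTong) (fun x => x) false
        ++ PySem.List.sorted (L.filter qOther) (fun x => x) false := by
    unfold orderHand
    have h := fold_invariant L [] [] [] []
    simp only [show PySem.List.sorted ([] : List String) (fun x => x) false = [] from rfl] at h
    rw [h, bucket_fold_eq_filters]
    simp
  rw [hA, alt_eq_sorted_lexKey L]
  -- both sides are key-nondecreasing rearrangements of L under an injective key
  have sp0 := PySem.List.sorted_perm (L.filter qWan) (fun x : String => x) false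
  have sp1 := PySem.List.sorted_perm (L.filter qBam) (fun x : String => x) false
  have sp2 := PySem.List.sorted_perm (L.filter qTong) (fun x : String => x) false
  have sp3 := PySem.List.sorted_perm (L.filter qOther) (fun x : String => x) false
  have hperm : (PySem.List.sorted L lexKey false).Perm
      (PySem.List.sorted (L.filter qWan) (fun x => x) false
        ++ PySem.List.sorted (L.filter qBam) (fun x => x) false
        ++ PySem.List.sorted (L.filter qTong) (fun x => x) false
        ++ PySem.List.sorted (L.filter qOther) (fun x => x) false) :=
    (PySem.List.sorted_perm L lexKey false).trans
      ((perm_partition L).trans (((sp0.append sp1).append sp2).append sp3).symm)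
  have m0 : ∀ t ∈ PySem.List.sorted (L.filter qWan) (fun x => x) false, orderHandSuit t = 0 := by
    intro t ht; rw [PySem.List.mem_sorted] at ht; exact suit_of_qWan (List.of_mem_filter ht)
  have m1 : ∀ t ∈ PySem.List.sorted (L.filter qBam) (fun x => x) false, orderHandSuit t = 1 := by
    intro t ht; rw [PySem.List.mem_sorted] at ht; exact suit_of_qBam (List.of_mem_filter ht)
  have m2 : ∀ t ∈ PySem.List.sorted (L.filter qTong) (fun x => x) false, orderHandSuit t = 2 := by
    intro t ht; rw [PySem.List.mem_sorted] at ht; exact suit_of_qTong (List.of_mem_filter ht)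
  have m3 : ∀ t ∈ PySem.List.sorted (L.filter qOther) (fun x => x) false, orderHandSuit t = 3 := by
    intro t ht; rw [PySem.List.mem_sorted] at ht; exact suit_of_qOther (List.of_mem_filter ht)
  refine (PySem.List.eq_of_perm_of_pairwise_le_of_injective lexKey lexKey_injective hperm
    (PySem.List.sorted_pairwise L lexKey) ?_).symm
  rw [List.append_assoc, List.append_assoc, List.pairwise_append]
  refine ⟨pairwise_key_sorted_bucket _ 0 (fun t ht => suit_of_qWan (List.of_mem_filter ht)), ?_, ?_⟩
  · rw [List.pairwise_append]
    refine ⟨pairwise_key_sorted_bucket _ 1 (fun t ht => suit_of_qBam (List.of_mem_filter ht)), ?_, ?_⟩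
    · rw [List.pairwise_append]
      refine ⟨pairwise_key_sorted_bucket _ 2 (fun t ht => suit_of_qTong (List.of_mem_filter ht)),
              pairwise_key_sorted_bucket _ 3 (fun t ht => suit_of_qOther (List.of_mem_filter ht)), ?_⟩
      intro a ha b hb
      exact key_le_of_suit_lt (by rw [m2 a ha, m3 b hb]; norm_num)
    · intro a ha b hb
      rcases List.mem_append.mp hb with hb | hb
      · exact key_le_of_suit_lt (by rw [m1 a ha, m2 b hb]; norm_num)
      · exact key_le_of_suit_lt (by rw [m1 a ha, m3 b hb]; norm_num)
  · intro a ha b hb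
    rcases List.mem_append.mp hb with hb | hb
    · exact key_le_of_suit_lt (by rw [m0 a ha, m1 b hb]; norm_num)
    rcases List.mem_append.mp hb with hb | hb
    · exact key_le_of_suit_lt (by rw [m0 a ha, m2 b hb]; norm_num)
    · exact key_le_of_suit_lt (by rw [m0 a ha, m3 b hb]; norm_num)
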